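-- pv_equiv track=rewrite | github.com/LuckyDenis/algo-notes | string/manacher.py | find_palindrome
-- ===== SOURCE A (Python) =====
-- def find_palindrome(string):
--     pal = [
--         [0 for _ in range(len(string))] for _ in range(2)
--     ]
--
--     for z in range(2):
--         left = 0
--         right = 0
--         for i in range(len(string)):
--             if i < right:
--                 pal[z][i] = min(
--                     right - i + (1 - z),
--                     pal[z][left + right - i + (1 - z)]
--                 )
--             left = i - pal[z][i]
--             right = i + pal[z][i] - (1 - z)
--             while True:
--                 if left - 1 < 0:
--                     break
--                 if right + 1 > len(string) - 1:
--                     break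
--                 if string[left - 1] != string[right + 1]:
--                     break
--                 pal[z][i] += 1
--                 left -= 1
--                 right += 1
--     return pal
-- ===== SOURCE B (Python) =====
-- def find_palindrome(string):
--     n = len(string)
--
--     def expand(left, right):
--         count = 0
--         while left - 1 >= 0 and right + 1 <= n - 1 and string[left - 1] == string[right + 1]:
--             count += 1
--             left -= 1
--             right += 1
--         return count
--
--     return [
--         [expand(i, i - 1) for i in range(n)],
--         [expand(i, i) for i in range(n)],
--     ]
-- ===== Notes on version B (the rewrite author's own statement) =====
-- stated objective: simpler
-- what changed: Replaces Manacher's single mutable pal array with left/right window and min()-based mirror reuse by an independent two-pointer expansion around each center (odd and even), computed per index with no shared state.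
import Mathlib
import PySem

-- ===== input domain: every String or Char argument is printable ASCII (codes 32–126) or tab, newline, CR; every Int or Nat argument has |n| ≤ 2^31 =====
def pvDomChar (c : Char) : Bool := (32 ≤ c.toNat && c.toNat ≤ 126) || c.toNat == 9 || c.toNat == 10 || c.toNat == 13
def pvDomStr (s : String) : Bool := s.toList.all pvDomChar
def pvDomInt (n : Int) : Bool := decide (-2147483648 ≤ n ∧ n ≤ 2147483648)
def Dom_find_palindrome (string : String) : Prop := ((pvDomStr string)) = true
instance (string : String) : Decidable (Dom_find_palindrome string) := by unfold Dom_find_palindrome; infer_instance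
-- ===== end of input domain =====

-- B replaces Manacher's min()-based mirror reuse by an independent two-pointer
-- expansion around every center, odd and even (objective: simpler).

-- ===== PORT A =====
-- the inner 'while True' loop: returns (pal[z][i], left, right) after expansion
def pvExpandA (s : List Char) (cnt left right : Int) : Int × Int × Int :=
  if left - 1 < 0 then (cnt, left, right)
  else if right + 1 > (s.length : Int) - 1 then (cnt, left, right)
  else if PySem.List.pyGetD s (left - 1) ' ' ≠ PySem.List.pyGetD s (right + 1) ' ' then
    (cnt, left, right)
  else pvExpandA s (cnt + 1) (left - 1) (right + 1)
termination_by left.toNat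
decreasing_by omega

-- the 'if i < right: pal[z][i] = min(...)' step; the value of pal[z][i] read afterwards
def pvP (d : Int) (st : List Int × Int × Int) (i : Nat) : Int :=
  if (i : Int) < st.2.2 then
    min (st.2.2 - (i : Int) + d) (PySem.List.pyGetD st.1 (st.2.1 + st.2.2 - (i : Int) + d) 0)
  else PySem.List.pyGetD st.1 (i : Int) 0

-- one iteration of 'for i in range(len(string))' at row z (d = 1 - z)
def pvStepA (s : List Char) (d : Int) (st : List Int × Int × Int) (i : Nat) :
    List Int × Int × Int :=
  let p := pvP d st i
  let r := pvExpandA s p ((i : Int) - p) ((i : Int) + p - d)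
  (st.1.set i r.1, r.2.1, r.2.2)

def pvRowA (s : List Char) (d : Int) : List Int :=
  ((List.range s.length).foldl (pvStepA s d) (List.replicate s.length 0, 0, 0)).1

def find_palindrome (string : String) : List (List Int) :=
  [pvRowA string.toList 1, pvRowA string.toList 0]

-- ===== PORT B =====
-- B's 'expand(left, right)': number of successful expansion steps
def pvExpandB (s : List Char) (left right : Int) : Int :=
  if 0 ≤ left - 1 ∧ right + 1 ≤ (s.length : Int) - 1 ∧
      PySem.List.pyGetD s (left - 1) ' ' = PySem.List.pyGetD s (right + 1) ' ' then
    1 + pvExpandB s (left - 1) (right + 1)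
  else 0
termination_by left.toNat
decreasing_by omega

def find_palindrome_alt (string : String) : List (List Int) :=
  [(List.range string.toList.length).map (fun (i : Nat) => pvExpandB string.toList (i : Int) ((i : Int) - 1)),
   (List.range string.toList.length).map (fun (i : Nat) => pvExpandB string.toList (i : Int) (i : Int))]

-- ===== PRECONDITION & SPEC =====
def Spec_find_palindrome (string : String) (out : List (List Int)) : Prop := out = find_palindrome_alt string
instance (string : String) (out : List (List Int)) : Decidable (Spec_find_palindrome string out) := by unfold Spec_find_palindrome; infer_instance

-- ===== CLAIM (what is proved, stated in full; the proofs are below) =====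
def Claim_equal_find_palindrome : Prop := ∀ (string : String), Dom_find_palindrome string → Spec_find_palindrome string (find_palindrome string)

-- ===== LEMMAS AND PROOFS =====

-- naive radius at center c for parity offset d (d = 1 - z)
def pvF (s : List Char) (d c : Int) : Int := pvExpandB s c (c - d)

-- the first K expansion pairs around center c match (with their bounds)
def pvMatch (s : List Char) (d c K : Int) : Prop :=
  ∀ j : Int, 1 ≤ j → j ≤ K →
    0 ≤ c - j ∧ c - d + j ≤ (s.length : Int) - 1 ∧
    PySem.List.pyGetD s (c - j) ' ' = PySem.List.pyGetD s (c - d + j) ' '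

theorem pvExpandB_nonneg (s : List Char) (l r : Int) : 0 ≤ pvExpandB s l r := by
  fun_induction pvExpandB with
  | case1 l r h ih => omega
  | case2 l r h => simp

theorem pvExpandB_pairs (s : List Char) (l r : Int) :
    ∀ k : Int, 0 ≤ k → k < pvExpandB s l r →
      0 ≤ l - k - 1 ∧ r + k + 1 ≤ (s.length : Int) - 1 ∧
      PySem.List.pyGetD s (l - k - 1) ' ' = PySem.List.pyGetD s (r + k + 1) ' ' := by
  fun_induction pvExpandB with
  | case1 l r h ih =>
    intro k hk0 hk
    rcases eq_or_lt_of_le hk0 with heq | hlt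
    · subst k
      refine ⟨by omega, by omega, ?_⟩
      have e1 : l - 0 - 1 = l - 1 := by ring
      have e2 : r + 0 + 1 = r + 1 := by ring
      rw [e1, e2]
      exact h.2.2
    · have := ih (k - 1) (by omega) (by omega)
      refine ⟨by omega, by omega, ?_⟩
      have e1 : l - 1 - (k - 1) - 1 = l - k - 1 := by ring
      have e2 : r + 1 + (k - 1) + 1 = r + k + 1 := by ring
      rw [e1, e2] at this
      exact this.2.2
  | case2 l r h =>
    intro k hk0 hk
    omega

theorem pvMatch_f (s : List Char) (d c : Int) : pvMatch s d c (pvF s d c) := by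
  intro j hj1 hj2
  have := pvExpandB_pairs s c (c - d) (j - 1) (by omega) (by unfold pvF at hj2; omega)
  refine ⟨by omega, by omega, ?_⟩
  have e1 : c - (j - 1) - 1 = c - j := by ring
  have e2 : c - d + (j - 1) + 1 = c - d + j := by ring
  rw [e1, e2] at this
  exact this.2.2

theorem pvF_nonneg (s : List Char) (d c : Int) : 0 ≤ pvF s d c := pvExpandB_nonneg _ _ _

theorem pvF_le (s : List Char) (d c : Int) (hc : 0 ≤ c) : pvF s d c ≤ c := by
  by_cases h : pvF s d c ≤ 0
  · omega
  · have := pvMatch_f s d c (pvF s d c) (by omega) le_rfl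
    omega

-- the span of a matched prefix is a palindrome: reflection through the center
theorem pvRefl (s : List Char) (d c K : Int) (hd : 0 ≤ d) (hM : pvMatch s d c K) :
    ∀ a : Int, c - K ≤ a → a ≤ c + K - d →
      PySem.List.pyGetD s a ' ' = PySem.List.pyGetD s (2 * c - d - a) ' ' := by
  intro a ha1 ha2
  by_cases hcase : a ≤ c - 1
  · have h := hM (c - a) (by omega) (by omega)
    have e1 : c - (c - a) = a := by ring
    have e2 : c - d + (c - a) = 2 * c - d - a := by ring
    rw [e1, e2] at h
    exact h.2.2
  · by_cases hz : a - c + d = 0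
    · have he : 2 * c - d - a = a := by omega
      rw [he]
    · have h := hM (a - c + d) (by omega) (by omega)
      have e1 : c - (a - c + d) = 2 * c - d - a := by ring
      have e2 : c - d + (a - c + d) = a := by ring
      rw [e1, e2] at h
      exact h.2.2.symm

-- skip lemma: expansion restarted after a verified prefix of p0 pairs
theorem pvSkip (s : List Char) (d c : Int) :
    ∀ t p0 : Int, 0 ≤ t → t ≤ p0 → pvMatch s d c p0 →
      pvExpandB s (c - t) (c - d + t) = (p0 - t) + pvExpandB s (c - p0) (c - d + p0) := by
  intro t p0 ht htp hM
  by_cases h : p0 - t ≤ 0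
  · have : t = p0 := by omega
    subst this
    ring
  · have hstep := hM (t + 1) (by omega) (by omega)
    rw [pvExpandB, if_pos]
    · have ih := pvSkip s d c (t + 1) p0 (by omega) (by omega) hM
      have e1 : c - t - 1 = c - (t + 1) := by ring
      have e2 : c - d + t + 1 = c - d + (t + 1) := by ring
      rw [e1, e2, ih]
      ring
    · refine ⟨by omega, by omega, ?_⟩
      have e1 : c - t - 1 = c - (t + 1) := by ring
      have e2 : c - d + t + 1 = c - d + (t + 1) := by ring
      rw [e1, e2]
      exact hstep.2.2
termination_by t p0 => (p0 - t).toNat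
decreasing_by omega

-- A's while loop computes B's expansion count (plus the final pointers)
theorem pvExpandA_eq (s : List Char) (cnt l r : Int) :
    pvExpandA s cnt l r =
      (cnt + pvExpandB s l r, l - pvExpandB s l r, r + pvExpandB s l r) := by
  fun_induction pvExpandA with
  | case1 cnt l r h =>
    rw [pvExpandB, if_neg (by omega)]; simp
  | case2 cnt l r h1 h =>
    rw [pvExpandB, if_neg (by omega)]; simp
  | case3 cnt l r h1 h2 h =>
    rw [pvExpandB, if_neg (fun hc => h hc.2.2)]; simp
  | case4 cnt l r h1 h2 h3 ih =>
    rw [pvExpandB, if_pos ⟨by omega, by omega, by simpa using h3⟩, ih]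
    refine Prod.ext (by ring) (Prod.ext (by ring) (by ring))

-- the mirror/min step produces a verified prefix around the new center c
theorem pvMirror (s : List Char) (d c : Int) (hd : 0 ≤ d) (hc : 1 ≤ c)
    (hbr : c < (c - 1) + pvF s d (c - 1) - d) :
    pvMatch s d c (min (pvF s d (c - 1) - 1) (pvF s d (c - 2))) := by
  have hK : pvMatch s d (c - 1) (pvF s d (c - 1)) := pvMatch_f s d (c - 1)
  have hMm : pvMatch s d (c - 2) (pvF s d (c - 2)) := pvMatch_f s d (c - 2)
  have hK2 : d + 2 ≤ pvF s d (c - 1) := by omega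
  have hKle : pvF s d (c - 1) ≤ c - 1 := pvF_le s d (c - 1) (by omega)
  have hRn : (c - 1) - d + pvF s d (c - 1) ≤ (s.length : Int) - 1 :=
    (hK (pvF s d (c - 1)) (by omega) le_rfl).2.1
  have hM0 : 0 ≤ pvF s d (c - 2) := pvF_nonneg s d (c - 2)
  have hMle : pvF s d (c - 2) ≤ c - 2 := pvF_le s d (c - 2) (by omega)
  intro j hj1 hj2
  have hjM : j ≤ pvF s d (c - 2) := by omega
  have hjK : j ≤ pvF s d (c - 1) - 1 := by omega
  have e1 : PySem.List.pyGetD s (c - j) ' ' = PySem.List.pyGetD s (c - 2 - d + j) ' ' := by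
    have h := pvRefl s d (c - 1) (pvF s d (c - 1)) hd hK (c - j) (by omega) (by omega)
    have e : 2 * (c - 1) - d - (c - j) = c - 2 - d + j := by ring
    rw [e] at h
    exact h
  have e2 : PySem.List.pyGetD s (c - d + j) ' ' = PySem.List.pyGetD s (c - 2 - j) ' ' := by
    have h := pvRefl s d (c - 1) (pvF s d (c - 1)) hd hK (c - d + j) (by omega) (by omega)
    have e : 2 * (c - 1) - d - (c - d + j) = c - 2 - j := by ring
    rw [e] at h
    exact h
  have e3 := hMm j hj1 hjM
  refine ⟨by omega, by omega, ?_⟩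
  rw [e1, e2]
  have e : c - 2 - d + j = (c - 2) - d + j := by ring
  have e' : c - 2 - j = (c - 2) - j := by ring
  rw [e, e']
  exact e3.2.2.symm

-- left/right of the loop state after processing indices [0, k)
def pvLR (s : List Char) (d : Int) (k : Nat) : Int × Int :=
  if k = 0 then (0, 0)
  else ((k : Int) - 1 - pvF s d ((k : Int) - 1), (k : Int) - 1 + pvF s d ((k : Int) - 1) - d)

-- loop invariant: after processing [0, k), pal holds the naive radii below k
theorem pvInv (s : List Char) (d : Int) (hd : 0 ≤ d) (k : Nat) (hk : k ≤ s.length) :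
    (List.range k).foldl (pvStepA s d) (List.replicate s.length 0, 0, 0) =
      ((List.range k).map (fun (i : Nat) => pvF s d (i : Int)) ++ List.replicate (s.length - k) 0,
       (pvLR s d k).1, (pvLR s d k).2) := by
  induction k with
  | zero => simp [pvLR]
  | succ k ih =>
    have hk' : k < s.length := by omega
    rw [List.range_succ, List.foldl_append, ih (by omega)]
    set pal := (List.range k).map (fun (i : Nat) => pvF s d (i : Int)) ++ List.replicate (s.length - k) 0
      with hpal
    have hlenmap : ((List.range k).map (fun (i : Nat) => pvF s d (i : Int))).length = k := by simp
    have hpallen : pal.length = s.length := by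
      rw [hpal]; simp; omega
    simp only [List.foldl_cons, List.foldl_nil, pvStepA]
    set p := pvP d (pal, (pvLR s d k).1, (pvLR s d k).2) k with hpdef
    have hp : pvMatch s d (k : Int) p ∧ 0 ≤ p := by
      by_cases hbr : (k : Int) < (pvLR s d k).2
      · have hk0 : k ≠ 0 := by
          intro h; subst h; simp [pvLR] at hbr
        have hLR : pvLR s d k =
            ((k : Int) - 1 - pvF s d ((k : Int) - 1),
             (k : Int) - 1 + pvF s d ((k : Int) - 1) - d) := by
          simp [pvLR, hk0]
        set K := pvF s d ((k : Int) - 1) with hKdef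
        have hbr' : (k : Int) < (k : Int) - 1 + K - d := by rw [hLR] at hbr; exact hbr
        have hKle : K ≤ (k : Int) - 1 := pvF_le s d ((k : Int) - 1) (by omega)
        have hk3 : 3 + d ≤ (k : Int) := by omega
        have hmir : (pvLR s d k).1 + (pvLR s d k).2 - (k : Int) + d = (k : Int) - 2 := by
          rw [hLR]; ring
        have hgetm : PySem.List.pyGetD pal ((k : Int) - 2) 0 = pvF s d ((k : Int) - 2) := by
          rw [PySem.List.pyGetD_eq_getElem pal (0 : Int)
            (show (0:Int) ≤ (k : Int) - 2 by omega)
            (show (k : Int) - 2 < (pal.length : Int) by rw [hpallen]; omega)]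
          simp only [hpal]
          rw [List.getElem_append_left (by rw [hlenmap]; omega)]
          rw [List.getElem_map, List.getElem_range]
          congr 1
          omega
        have hpe : p = min (K - 1) (pvF s d ((k : Int) - 2)) := by
          rw [hpdef, pvP, if_pos hbr, hmir, hgetm, hLR]
          congr 1
          ring
        refine ⟨?_, ?_⟩
        · rw [hpe]
          exact pvMirror s d (k : Int) hd (by omega) hbr'
        · rw [hpe]
          exact le_min (by omega) (pvF_nonneg s d _)
      · have hget0 : PySem.List.pyGetD pal (k : Int) 0 = 0 := by
          rw [PySem.List.pyGetD_natCast, hpal, List.getD_eq_getElem?_getD,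
            List.getElem?_append_right (by rw [hlenmap]), hlenmap]
          have hrep : (List.replicate (s.length - k) (0 : Int))[k - k]? = some 0 := by
            rw [List.getElem?_replicate, if_pos (by omega)]
          rw [hrep]
          rfl
        have hpe : p = 0 := by rw [hpdef, pvP, if_neg hbr, hget0]
        refine ⟨?_, by omega⟩
        intro j hj1 hj2
        omega
    obtain ⟨hM, hp0⟩ := hp
    have hskip := pvSkip s d (k : Int) 0 p (le_refl 0) hp0 hM
    have e0 : (k : Int) - 0 = (k : Int) := by ring
    have e0' : (k : Int) - d + 0 = (k : Int) - d := by ring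
    have ep : (k : Int) - d + p = (k : Int) + p - d := by ring
    rw [e0, e0', ep] at hskip
    have hf : pvF s d (k : Int) = p + pvExpandB s ((k : Int) - p) ((k : Int) + p - d) := by
      rw [pvF, hskip]; ring
    rw [pvExpandA_eq]
    have hres1 : p + pvExpandB s ((k : Int) - p) ((k : Int) + p - d) = pvF s d (k : Int) :=
      hf.symm
    have hres2 : (k : Int) - p - pvExpandB s ((k : Int) - p) ((k : Int) + p - d) =
        (k : Int) - pvF s d (k : Int) := by omega
    have hres3 : (k : Int) + p - d + pvExpandB s ((k : Int) - p) ((k : Int) + p - d) =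
        (k : Int) + pvF s d (k : Int) - d := by omega
    have hLR1 : pvLR s d (k + 1) =
        ((k : Int) - pvF s d (k : Int), (k : Int) + pvF s d (k : Int) - d) := by
      have hc1 : ((k + 1 : Nat) : Int) - 1 = (k : Int) := by push_cast; ring
      simp only [pvLR, Nat.succ_ne_zero, if_false, hc1]
    have hrep : List.replicate (s.length - k) (0 : Int) =
        0 :: List.replicate (s.length - (k + 1)) 0 := by
      have he : s.length - k = (s.length - (k + 1)) + 1 := by omega
      rw [he, List.replicate_succ]
    refine Prod.ext ?_ (Prod.ext ?_ ?_)
    · show pal.set k (p + pvExpandB s ((k : Int) - p) ((k : Int) + p - d)) = _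
      rw [hres1, hpal, hrep, List.map_append, List.set_append,
        if_neg (by rw [hlenmap]; omega), hlenmap]
      simp
    · show (k : Int) - p - pvExpandB s ((k : Int) - p) ((k : Int) + p - d) = _
      rw [hres2, hLR1]
    · show (k : Int) + p - d + pvExpandB s ((k : Int) - p) ((k : Int) + p - d) = _
      rw [hres3, hLR1]

-- ===== VERDICT (by name: the statement is the Claim_ definition above) =====
theorem find_palindrome_spec : Claim_equal_find_palindrome := by
  unfold Claim_equal_find_palindrome Spec_find_palindrome
  intro str _
  unfold find_palindrome find_palindrome_alt pvRowA
  rw [pvInv str.toList 1 (by norm_num) str.toList.length le_rfl,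
    pvInv str.toList 0 (by norm_num) str.toList.length le_rfl]
  simp [pvF]
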